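-- pv_equiv track=rewrite | github.com/DmitryTyshkevich/PY_109 | DZ/TYSHKEVICH_RECURSION_PY109.py | GetFibonacciList
-- ===== SOURCE A (Python) =====
-- def GetFibonacciList(n, L):
--     # Проверить, корректна ли длина списка
--     count = len(L)
--
--     if len(L) < 2:
--         return []
--
--     # Получить последние числа в списке L
--     num1 = L[count - 2]
--     num2 = L[count - 1]
--
--     # Формула расчета следующего числа
--     if (num1 + num2) < n:
--         L = L + [num1 + num2]
--         return GetFibonacciList(n, L)  # вызвать рекурсивно функцию
--     else:
--         return L  # если достигнут конец, то обычный выход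
-- ===== SOURCE B (Python) =====
-- def GetFibonacciList(n, L):
--     if len(L) < 2:
--         return []
--     a, b = L[-2], L[-1]
--     tail = []
--     while a + b < n:
--         a, b = b, a + b
--         tail.append(b)
--     return L + tail
-- ===== Notes on version B (the rewrite author's own statement) =====
-- stated objective: simpler
-- what changed: Replaces A's tail recursion that rebuilds and re-indexes the whole list on each call (a full list copy per appended element) with a single iterative while loop maintaining only the last pair (a,b) and an appended tail, concatenated to L once at the end.
import Mathlib
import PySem

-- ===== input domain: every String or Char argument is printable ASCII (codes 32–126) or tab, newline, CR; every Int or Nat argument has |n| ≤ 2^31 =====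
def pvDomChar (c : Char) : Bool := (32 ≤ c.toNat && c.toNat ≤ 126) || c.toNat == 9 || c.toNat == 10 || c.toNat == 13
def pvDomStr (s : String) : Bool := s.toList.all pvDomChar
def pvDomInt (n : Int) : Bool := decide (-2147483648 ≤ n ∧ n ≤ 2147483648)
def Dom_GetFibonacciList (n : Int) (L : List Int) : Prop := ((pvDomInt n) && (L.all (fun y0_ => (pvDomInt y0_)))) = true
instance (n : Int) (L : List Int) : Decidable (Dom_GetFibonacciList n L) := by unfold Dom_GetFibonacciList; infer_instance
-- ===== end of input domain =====

-- B replaces A's tail recursion (which rebuilds and re-indexes the whole list on every call)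
-- by one iterative loop over the last pair (a,b), appending the generated tail to L once (simpler).

-- ===== PORT A =====
-- A's recursion, made total with a fuel counter (pvFibFuel suffices on Pre_, proved below).
def pvFibFuel (n a b : Int) : Nat := a.natAbs + b.natAbs + n.toNat + 3

def fibArec (n : Int) : Nat → List Int → List Int
  | 0, _ => []
  | fuel + 1, L =>
    let count : Int := L.length
    if L.length < 2 then []
    else
      let num1 := PySem.List.pyGetD L (count - 2) 0
      let num2 := PySem.List.pyGetD L (count - 1) 0
      if num1 + num2 < n then fibArec n fuel (L ++ [num1 + num2])
      else L

def GetFibonacciList (n : Int) (L : List Int) : List Int :=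
  fibArec n
    (pvFibFuel n (PySem.List.pyGetD L ((L.length : Int) - 2) 0)
                 (PySem.List.pyGetD L ((L.length : Int) - 1) 0)) L

-- ===== PORT B =====
-- B's while loop, as fuel recursion producing the appended tail front-to-back.
def fibBtail (n : Int) : Nat → Int → Int → List Int
  | 0, _, _ => []
  | fuel + 1, a, b =>
    if a + b < n then (a + b) :: fibBtail n fuel b (a + b)
    else []

def GetFibonacciList_alt (n : Int) (L : List Int) : List Int :=
  if L.length < 2 then []
  else
    let a := PySem.List.pyGetD L (-2) 0
    let b := PySem.List.pyGetD L (-1) 0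
    L ++ fibBtail n (pvFibFuel n a b) a b

-- ===== PRECONDITION & SPEC =====
-- Closed-form test: starting from last pair (a,b), the Fibonacci iteration tends to +∞
-- (the coefficient of the golden-ratio mode is positive), stated with integer arithmetic only.
def FibGrows (a b : Int) : Prop :=
  (a = 0 ∧ 1 ≤ b) ∨
  (0 < a ∧ (a ≤ 2 * b ∨ (2 * b - a) ^ 2 < 5 * a ^ 2)) ∨
  (a < 0 ∧ 0 < 2 * b - a ∧ 5 * a ^ 2 < (2 * b - a) ^ 2)

-- Pre_ excludes exactly the inputs on which A never reaches num1+num2 >= n and so recurses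
-- forever (Python raises RecursionError there; B's while loop does not return either):
-- lists of length >= 2 whose last pair (a,b) has a+b < n and a+2b < n and fails FibGrows,
-- i.e. the Fibonacci iteration from (a,b) tends to -infinity (or is constant 0).
def Pre_GetFibonacciList (n : Int) (L : List Int) : Prop :=
  L.length < 2 ∨
  n ≤ PySem.List.pyGetD L (-2) 0 + PySem.List.pyGetD L (-1) 0 ∨
  n ≤ PySem.List.pyGetD L (-2) 0 + 2 * PySem.List.pyGetD L (-1) 0 ∨
  FibGrows (PySem.List.pyGetD L (-2) 0) (PySem.List.pyGetD L (-1) 0)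
instance (n : Int) (L : List Int) : Decidable (Pre_GetFibonacciList n L) := by
  unfold Pre_GetFibonacciList FibGrows; infer_instance

def pvWitness_GetFibonacciList : Int × List Int := (30, [1, 1])

def Spec_GetFibonacciList (n : Int) (L : List Int) (out : List Int) : Prop := out = GetFibonacciList_alt n L
instance (n : Int) (L : List Int) (out : List Int) : Decidable (Spec_GetFibonacciList n L out) := by unfold Spec_GetFibonacciList; infer_instance

-- ===== CLAIM (what is proved, stated in full; the proofs are below) =====
def Claim_equal_GetFibonacciList : Prop := ∀ (n : Int) (L : List Int), Dom_GetFibonacciList n L → Pre_GetFibonacciList n L → Spec_GetFibonacciList n L (GetFibonacciList n L)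

-- ===== LEMMAS AND PROOFS =====

lemma pyGetD_last_two (M : List Int) (a b : Int) :
    PySem.List.pyGetD (M ++ [a, b]) ((((M ++ [a, b]).length : Int)) - 2) 0 = a ∧
    PySem.List.pyGetD (M ++ [a, b]) ((((M ++ [a, b]).length : Int)) - 1) 0 = b := by
  constructor
  · have h : (((M ++ [a, b]).length : Int)) - 2 = (M.length : Int) := by simp
    rw [h, PySem.List.pyGetD_natCast]
    simp
  · have h : (((M ++ [a, b]).length : Int)) - 1 = ((M.length + 1 : Nat) : Int) := by
      simp; omega
    rw [h, PySem.List.pyGetD_natCast]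
    simp

lemma pyGetD_neg_last_two (M : List Int) (a b : Int) :
    PySem.List.pyGetD (M ++ [a, b]) (-2) 0 = a ∧
    PySem.List.pyGetD (M ++ [a, b]) (-1) 0 = b := by
  constructor
  · rw [PySem.List.pyGetD_neg_ofNat (M ++ [a, b]) 2 0 (by omega) (by simp)]
    simp
  · rw [PySem.List.pyGetD_neg_ofNat (M ++ [a, b]) 1 0 (by omega) (by simp)]
    simp

-- one pre-good step: FibGrows is preserved and either the next state is good
-- (last element ≥ 1 and sum ≥ 1) or |a|+|b| strictly decreases
lemma fibGrows_step (a b : Int) (hg : FibGrows a b) (hng : ¬ (1 ≤ b ∧ 1 ≤ a + b)) :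
    (1 ≤ a + b ∧ 1 ≤ b + (a + b)) ∨
    (FibGrows b (a + b) ∧ b.natAbs + (a + b).natAbs < a.natAbs + b.natAbs) := by
  rcases hg with ⟨ha, hb⟩ | ⟨ha, hq⟩ | ⟨ha, h1, h2⟩
  · exact absurd ⟨hb, by omega⟩ hng
  · -- a > 0; ¬good forces b ≤ 0
    have hb0 : b ≤ 0 := by by_contra h; exact hng ⟨by omega, by omega⟩
    rcases eq_or_lt_of_le hb0 with rfl | hbneg
    · -- b = 0 : next state (0, a) is good
      left; constructor <;> omega
    · -- b < 0 : quadratic disjunct must hold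
      have hq2 : (2 * b - a) ^ 2 < 5 * a ^ 2 := by
        rcases hq with h | h
        · omega
        · exact h
      have hkey : b ^ 2 < a ^ 2 + a * b := by nlinarith
      have h2ab : 0 < 2 * a + b := by nlinarith
      right
      refine ⟨Or.inr (Or.inr ⟨hbneg, by omega, by nlinarith⟩), ?_⟩
      omega
  · -- a < 0 : derive b > 0, and ¬good forces a + b ≤ 0
    have hbpos : 0 < b := by nlinarith
    have hs : a + b ≤ 0 := by by_contra h; exact hng ⟨by omega, by omega⟩
    have hkey : a ^ 2 + a * b < b ^ 2 := by nlinarith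
    right
    refine ⟨Or.inr (Or.inl ⟨hbpos, ?_⟩), by omega⟩
    by_cases hle : b ≤ 2 * (a + b)
    · exact Or.inl hle
    · exact Or.inr (by nlinarith)

-- good phase: both elements of the invariant ≥ 1, the sum grows by ≥ 1 each step
lemma fibA_good (n : Int) :
    ∀ (fuel : Nat) (M : List Int) (a b : Int),
      1 ≤ b → 1 ≤ a + b → (n - (a + b)).toNat < fuel →
      fibArec n fuel (M ++ [a, b]) = (M ++ [a, b]) ++ fibBtail n fuel a b := by
  intro fuel
  induction fuel with
  | zero => intro M a b _ _ h; omega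
  | succ f ih =>
    intro M a b hb hs hf
    rw [fibArec, fibBtail]
    have hlen : ¬ (M ++ [a, b]).length < 2 := by simp
    obtain ⟨h1, h2⟩ := pyGetD_last_two M a b
    simp only [hlen, if_false, h1, h2]
    by_cases hc : a + b < n
    · simp only [hc, if_true]
      have := ih (M ++ [a]) b (a + b) hs (by omega) (by omega)
      have hre : M ++ [a] ++ [b, a + b] = (M ++ [a, b]) ++ [a + b] := by simp
      rw [hre] at this
      rw [this, List.append_assoc]
      simp
    · simp [hc]

-- pre-good phase: fuel |a|+|b| + (n-1)⁺ + 1 suffices for any FibGrows state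
lemma fibA_pre (n : Int) :
    ∀ (fuel : Nat) (M : List Int) (a b : Int),
      FibGrows a b → a.natAbs + b.natAbs + (n - 1).toNat + 1 < fuel →
      fibArec n fuel (M ++ [a, b]) = (M ++ [a, b]) ++ fibBtail n fuel a b := by
  intro fuel
  induction fuel with
  | zero => intro M a b _ h; omega
  | succ f ih =>
    intro M a b hg hf
    by_cases hgood : 1 ≤ b ∧ 1 ≤ a + b
    · exact fibA_good n (f + 1) M a b hgood.1 hgood.2 (by omega)
    · rw [fibArec, fibBtail]
      have hlen : ¬ (M ++ [a, b]).length < 2 := by simp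
      obtain ⟨h1, h2⟩ := pyGetD_last_two M a b
      simp only [hlen, if_false, h1, h2]
      by_cases hc : a + b < n
      · simp only [hc, if_true]
        have hre : M ++ [a] ++ [b, a + b] = (M ++ [a, b]) ++ [a + b] := by simp
        rcases fibGrows_step a b hg hgood with ⟨hs1, hs2⟩ | ⟨hg', hm⟩
        · -- next state is good
          have := fibA_good n f (M ++ [a]) b (a + b) hs1 hs2 (by omega)
          rw [hre] at this
          rw [this, List.append_assoc]; simp
        · -- measure strictly decreases
          have := ih (M ++ [a]) b (a + b) hg' (by omega)
          rw [hre] at this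
          rw [this, List.append_assoc]; simp
      · simp [hc]

lemma fib_spec_aux (n : Int) (L : List Int) :
    Pre_GetFibonacciList n L → GetFibonacciList n L = GetFibonacciList_alt n L := by
  intro hpre
  by_cases hlen : L.length < 2
  · have hfe : pvFibFuel n (PySem.List.pyGetD L ((L.length : Int) - 2) 0)
        (PySem.List.pyGetD L ((L.length : Int) - 1) 0)
        = (PySem.List.pyGetD L ((L.length : Int) - 2) 0).natAbs
          + (PySem.List.pyGetD L ((L.length : Int) - 1) 0).natAbs + n.toNat + 2 + 1 := by
      unfold pvFibFuel; omega
    unfold GetFibonacciList GetFibonacciList_alt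
    rw [hfe, fibArec]
    simp [hlen]
  · obtain ⟨M, a, b, rfl⟩ : ∃ M a b, L = M ++ [a, b] := by
      match hr : L.reverse with
      | [] => exfalso
              have := congrArg List.length hr
              simp only [List.length_reverse, List.length_nil] at this; omega
      | [x] => exfalso
               have := congrArg List.length hr
               simp only [List.length_reverse, List.length_cons, List.length_nil] at this; omega
      | (y :: x :: T) =>
        refine ⟨T.reverse, x, y, ?_⟩
        have := congrArg List.reverse hr
        simpa using this
    obtain ⟨h1, h2⟩ := pyGetD_last_two M a b
    obtain ⟨h1', h2'⟩ := pyGetD_neg_last_two M a b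
    unfold GetFibonacciList GetFibonacciList_alt
    simp only [hlen, if_false, h1, h2, h1', h2']
    unfold Pre_GetFibonacciList at hpre
    rw [h1', h2'] at hpre
    rcases hpre with h | h | h | h
    · omega
    · -- sum already ≥ n: both sides return L unchanged
      have hfe : pvFibFuel n a b = (a.natAbs + b.natAbs + n.toNat + 2) + 1 := by
        unfold pvFibFuel; omega
      rw [hfe, fibArec, fibBtail]
      have hl2 : ¬ (M ++ [a, b]).length < 2 := by simp
      simp only [hl2, if_false, h1, h2]
      have hc : ¬ (a + b < n) := by omega
      simp [hc]
    · -- a+2b ≥ n: at most one appended element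
      by_cases hc : a + b < n
      · have hfe : pvFibFuel n a b = (a.natAbs + b.natAbs + n.toNat + 1 + 1) + 1 := by
          unfold pvFibFuel; omega
        rw [hfe, fibArec, fibBtail]
        have hl2 : ¬ (M ++ [a, b]).length < 2 := by simp
        simp only [hl2, if_false, h1, h2, hc, if_true]
        have hre : M ++ [a] ++ [b, a + b] = (M ++ [a, b]) ++ [a + b] := by simp
        obtain ⟨g1, g2⟩ := pyGetD_last_two (M ++ [a]) b (a + b)
        rw [← hre, fibArec, fibBtail]
        have hl3 : ¬ (M ++ [a] ++ [b, a + b]).length < 2 := by simp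
        simp only [hl3, if_false, g1, g2]
        have hc2 : ¬ (b + (a + b) < n) := by omega
        simp [hc2, hre]
      · have hfe : pvFibFuel n a b = (a.natAbs + b.natAbs + n.toNat + 2) + 1 := by
          unfold pvFibFuel; omega
        rw [hfe, fibArec, fibBtail]
        have hl2 : ¬ (M ++ [a, b]).length < 2 := by simp
        simp only [hl2, if_false, h1, h2]
        simp [hc]
    · exact fibA_pre n (pvFibFuel n a b) M a b h (by unfold pvFibFuel; omega)

-- ===== VERDICT (by name: the statement is the Claim_ definition above) =====
theorem GetFibonacciList_spec : Claim_equal_GetFibonacciList := by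
  intro n L _ hpre
  unfold Spec_GetFibonacciList
  exact fib_spec_aux n L hpre
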